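-- pv_equiv track=rewrite | github.com/sgrinich/CS328_Project | similarity.py | prototype
-- ===== SOURCE A (Python) =====
-- def prototype(exemplars):
-- 	prototype_list = [0 for x in range(len(exemplars[0]))]
-- 	num_exemplars = len(exemplars)
--
--
-- 	for exemplar in exemplars:
-- 		for i in range(len(exemplar)):
-- 			prototype_list[i] += exemplar[i]
--
-- 	for i in range(len(prototype_list)):
-- 		if prototype_list[i] >= num_exemplars/2:
-- 			prototype_list[i] = 1
-- 		else:
-- 			prototype_list[i] = 0
--
-- 	return prototype_list
-- ===== SOURCE B (Python) =====
-- def prototype(exemplars):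
--     n = len(exemplars)
--     return [1 if 2 * sum(row[i] for row in exemplars if i < len(row)) >= n else 0
--             for i in range(len(exemplars[0]))]
-- ===== Notes on version B (the rewrite author's own statement) =====
-- stated objective: simpler
-- what changed: Replaces A's row-major two-pass scheme (mutable accumulator list updated in place, then a second thresholding pass) with a single column-major comprehension that sums each column independently (skipping rows too short to reach it) and thresholds it on the spot, maintaining no state across columns; the float threshold sum >= n/2 becomes the exact integer test 2*sum >= n.
import Mathlib
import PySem

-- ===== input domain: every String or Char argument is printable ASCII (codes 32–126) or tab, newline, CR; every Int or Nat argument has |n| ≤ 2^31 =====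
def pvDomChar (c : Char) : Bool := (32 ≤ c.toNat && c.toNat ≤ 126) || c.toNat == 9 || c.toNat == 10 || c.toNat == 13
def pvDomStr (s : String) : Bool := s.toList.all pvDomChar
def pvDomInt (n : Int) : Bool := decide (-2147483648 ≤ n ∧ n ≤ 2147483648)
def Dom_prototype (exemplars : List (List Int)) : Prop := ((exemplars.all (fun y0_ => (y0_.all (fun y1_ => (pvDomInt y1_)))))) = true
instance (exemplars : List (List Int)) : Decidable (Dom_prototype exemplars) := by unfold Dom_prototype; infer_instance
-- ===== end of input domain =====

-- B replaces A's row-major in-place accumulate-then-threshold two-pass loop with a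
-- column-major single comprehension (one independent sum per column); same cost, simpler.


-- ===== PORT A =====
-- transliteration of A; the float comparison `s >= n/2` on ints is ported exactly as `2*s ≥ n`
def prototype (exemplars : List (List Int)) : List Int :=
  let first := (PySem.List.pyGet? exemplars 0).getD []
  let protoInit : List Int := (PySem.List.pyRange 0 (first.length : Int) 1).map (fun _ => 0)
  let numExemplars : Int := exemplars.length
  let acc := exemplars.foldl (fun p e =>
      (PySem.List.pyRange 0 (e.length : Int) 1).foldl
        (fun p i => p.set i.toNat ((PySem.List.pyGet? p i).getD 0 + (PySem.List.pyGet? e i).getD 0)) p)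
    protoInit
  acc.map (fun x => if 2 * x ≥ numExemplars then 1 else 0)

-- ===== PORT B =====
def prototype_alt (exemplars : List (List Int)) : List Int :=
  let n : Int := exemplars.length
  (PySem.List.pyRange 0 (((PySem.List.pyGet? exemplars 0).getD []).length : Int) 1).map
    (fun i => if 2 * (exemplars.foldl
        (fun s row => if i < (row.length : Int) then s + (PySem.List.pyGet? row i).getD 0 else s) 0) ≥ n
      then 1 else 0)

-- ===== PRECONDITION & SPEC =====
-- A raises IndexError on empty input (exemplars[0]) and on inputs with a row strictly longer
-- than the first row (writing past the accumulator); Pre_ keeps exactly the inputs on which A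
-- returns normally: non-empty, every row at most as long as the first.
def Pre_prototype (exemplars : List (List Int)) : Prop :=
  exemplars ≠ [] ∧ ∀ row ∈ exemplars, row.length ≤ (exemplars.headD []).length
instance (exemplars : List (List Int)) : Decidable (Pre_prototype exemplars) := by unfold Pre_prototype; infer_instance
def pvWitness_prototype : List (List Int) := [[1, 0, 1], [0, 0, 1]]

def Spec_prototype (exemplars : List (List Int)) (out : List Int) : Prop := out = prototype_alt exemplars
instance (exemplars : List (List Int)) (out : List Int) : Decidable (Spec_prototype exemplars out) := by unfold Spec_prototype; infer_instance

-- ===== CLAIM (what is proved, stated in full; the proofs are below) =====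
def Claim_equal_prototype : Prop := ∀ (exemplars : List (List Int)), Dom_prototype exemplars → Pre_prototype exemplars → Spec_prototype exemplars (prototype exemplars)

-- ===== LEMMAS AND PROOFS =====

theorem pv_foldl_ext {a b : Type} (f g : a → b → a) (h : ∀ x y, f x y = g x y)
    (l : List b) (init : a) : l.foldl f init = l.foldl g init := by
  induction l generalizing init with
  | nil => rfl
  | cons y l ih => simp only [List.foldl_cons, h]; exact ih _

-- pointwise add of a (possibly shorter) row e into the accumulator p
def pvAddInto (p e : List Int) : List Int :=
  List.zipWith (· + ·) p e ++ p.drop e.length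

theorem pvAddInto_length (p e : List Int) (h : e.length ≤ p.length) :
    (pvAddInto p e).length = p.length := by
  simp only [pvAddInto, List.length_append, List.length_zipWith, List.length_drop]
  omega

-- A's inner loop, generalized: writing positions qpre.length .. qpre.length + e.length - 1
-- of qpre ++ p adds e pointwise onto the first e.length entries of p.
theorem pv_inner_gen (e : List Int) : ∀ (p qpre epre : List Int),
    e.length ≤ p.length → epre.length = qpre.length →
    (List.range' qpre.length e.length 1).foldl
      (fun q i => q.set i ((q[i]?.getD 0) + ((epre ++ e)[i]?.getD 0))) (qpre ++ p)
    = qpre ++ pvAddInto p e := by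
  induction e with
  | nil =>
    intro p qpre epre _ _
    simp [pvAddInto]
  | cons b e' ih =>
    intro p qpre epre hp he
    cases p with
    | nil => simp at hp
    | cons a p' =>
      simp only [List.length_cons, List.range'_succ, List.foldl_cons]
      have hq : (qpre ++ a :: p')[qpre.length]? = some a := by
        rw [List.getElem?_append_right (le_refl _)]
        simp
      have heq : (epre ++ b :: e')[qpre.length]? = some b := by
        rw [← he, List.getElem?_append_right (le_refl _)]
        simp
      have hset : (qpre ++ a :: p').set qpre.length ((some a).getD 0 + (some b).getD 0)
          = (qpre ++ [a + b]) ++ p' := by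
        rw [List.set_append_right _ _ (le_refl _)]
        simp
      rw [hq, heq, hset]
      have hassoc : epre ++ b :: e' = (epre ++ [b]) ++ e' := by simp
      have hlen : qpre.length + 1 = (qpre ++ [a + b]).length := by simp
      rw [hassoc, hlen, ih p' (qpre ++ [a + b]) (epre ++ [b])
        (by simp at hp; omega) (by simp [← he])]
      simp [pvAddInto]

theorem pv_inner (p e : List Int) (h : e.length ≤ p.length) :
    (PySem.List.pyRange 0 (e.length : Int) 1).foldl
      (fun q i => q.set i.toNat ((PySem.List.pyGet? q i).getD 0 + (PySem.List.pyGet? e i).getD 0)) p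
    = pvAddInto p e := by
  rw [PySem.List.pyRange_zero_natCast, List.foldl_map, List.range_eq_range']
  refine Eq.trans (pv_foldl_ext _
    (fun (q : List Int) (i : Nat) => q.set i ((q[i]?.getD 0) + (e[i]?.getD 0))) ?_ _ _) ?_
  · intro q i
    simp [PySem.List.pyGet?_natCast]
  · simpa using pv_inner_gen e p [] [] h rfl

-- A's outer loop equals a fold of pvAddInto when no row outruns the accumulator.
theorem pv_outer (rows : List (List Int)) : ∀ (p : List Int),
    (∀ r ∈ rows, r.length ≤ p.length) →
    rows.foldl (fun q e =>
      (PySem.List.pyRange 0 (e.length : Int) 1).foldl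
        (fun q i => q.set i.toNat ((PySem.List.pyGet? q i).getD 0 + (PySem.List.pyGet? e i).getD 0)) q) p
    = rows.foldl (fun q e => pvAddInto q e) p := by
  induction rows with
  | nil => intro p _; rfl
  | cons r rows ih =>
    intro p h
    simp only [List.foldl_cons]
    rw [pv_inner p r (h r (List.mem_cons_self))]
    exact ih _ (by
      intro r' hr'
      rw [pvAddInto_length p r (h r List.mem_cons_self)]
      exact h r' (List.mem_cons_of_mem _ hr'))

theorem pvAddInto_get (p e : List Int) (i : Nat) (he : e.length ≤ p.length) (hi : i < p.length) :
    ((pvAddInto p e)[i]?.getD 0)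
    = (p[i]?.getD 0) + (if i < e.length then (e[i]?.getD 0) else 0) := by
  have hz : (List.zipWith (· + ·) p e).length = e.length := by
    rw [List.length_zipWith]; omega
  by_cases hie : i < e.length
  · rw [pvAddInto, List.getElem?_append_left (by omega)]
    rw [List.getElem?_zipWith, List.getElem?_eq_getElem hi, List.getElem?_eq_getElem hie]
    simp [hie]
  · rw [pvAddInto, List.getElem?_append_right (by omega), hz]
    rw [List.getElem?_drop]
    have : e.length + (i - e.length) = i := by omega
    rw [this]
    simp [hie]

-- column characterization of the pvAddInto fold
theorem pv_col (rows : List (List Int)) : ∀ (p : List Int) (i : Nat),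
    (∀ r ∈ rows, r.length ≤ p.length) → i < p.length →
    ((rows.foldl (fun q e => pvAddInto q e) p)[i]?.getD 0)
    = rows.foldl (fun s r => if i < r.length then s + (r[i]?.getD 0) else s) (p[i]?.getD 0) := by
  induction rows with
  | nil => intro p i _ _; rfl
  | cons r rows ih =>
    intro p i h hi
    simp only [List.foldl_cons]
    have hlen : r.length ≤ p.length := h r List.mem_cons_self
    have hz : (pvAddInto p r).length = p.length := pvAddInto_length p r hlen
    rw [ih (pvAddInto p r) i
      (fun r' hr' => by rw [hz]; exact h r' (List.mem_cons_of_mem _ hr')) (hz ▸ hi)]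
    rw [pvAddInto_get p r i hlen hi]
    by_cases hir : i < r.length <;> simp [hir]

theorem pv_fold_len_eq (rows : List (List Int)) : ∀ (p : List Int),
    (∀ r ∈ rows, r.length ≤ p.length) →
    (rows.foldl (fun q e => pvAddInto q e) p).length = p.length := by
  induction rows with
  | nil => intro p _; rfl
  | cons r rows ih =>
    intro p h
    simp only [List.foldl_cons]
    have hz : (pvAddInto p r).length = p.length := pvAddInto_length p r (h r List.mem_cons_self)
    rw [← hz]
    exact ih _ (fun r' hr' => by rw [hz]; exact h r' (List.mem_cons_of_mem _ hr'))

-- ===== VERDICT (by name: the statement is the Claim_ definition above) =====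
theorem prototype_spec : Claim_equal_prototype := by
  intro exemplars _ hpre
  obtain ⟨hne, hrect⟩ := hpre
  unfold Spec_prototype
  obtain ⟨e0, rest, rfl⟩ : ∃ e0 rest, exemplars = e0 :: rest := by
    cases exemplars with
    | nil => exact absurd rfl hne
    | cons a l => exact ⟨a, l, rfl⟩
  simp only [List.headD_cons] at hrect
  have hfirst : ((PySem.List.pyGet? (e0 :: rest) 0).getD []) = e0 := by
    rw [PySem.List.pyGet?_zero_cons]; rfl
  simp only [prototype, prototype_alt, hfirst]
  set rows := e0 :: rest with hrows
  set m := e0.length with hm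
  have hinitlen : ((PySem.List.pyRange 0 (m : Int) 1).map (fun _ => (0:Int))).length = m := by
    rw [List.length_map, PySem.List.length_pyRange_one]; simp
  have hinit_get : ∀ i : Nat, i < m →
      (((PySem.List.pyRange 0 (m : Int) 1).map (fun _ => (0:Int)))[i]?.getD 0) = 0 := by
    intro i hi
    rw [PySem.List.getElem?_map_pyRange_zero _ m i hi]
    rfl
  set init := (PySem.List.pyRange 0 (m : Int) 1).map (fun _ => (0:Int)) with hinitdef
  have hlens : ∀ r ∈ rows, r.length ≤ init.length := by
    intro r hr; rw [hinitlen]; exact hrect r hr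
  rw [pv_outer rows init hlens]
  set acc := rows.foldl (fun q e => pvAddInto q e) init with hacc
  have hacclen : acc.length = m := by
    rw [hacc, pv_fold_len_eq rows init hlens, hinitlen]
  apply List.ext_getElem?
  intro i
  by_cases hi : i < m
  · rw [List.getElem?_map, List.getElem?_eq_getElem (by rw [hacclen]; exact hi)]
    rw [PySem.List.getElem?_map_pyRange_zero _ m i hi]
    simp only [Option.map_some]
    have h1 : acc[i] = acc[i]?.getD 0 := by
      rw [List.getElem?_eq_getElem (by rw [hacclen]; exact hi)]; rfl
    have hcol : acc[i]
        = rows.foldl (fun s r => if i < r.length then s + (r[i]?.getD 0) else s) 0 := by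
      rw [h1, hacc, pv_col rows init i hlens (by rw [hinitlen]; exact hi), hinit_get i hi]
    have hsum : rows.foldl
          (fun s row => if (i : Int) < (row.length : Int) then s + (PySem.List.pyGet? row (i : Int)).getD 0 else s) 0
        = rows.foldl (fun s r => if i < r.length then s + (r[i]?.getD 0) else s) 0 := by
      refine pv_foldl_ext _ _ ?_ _ _
      intro s r
      rw [PySem.List.pyGet?_natCast]
      by_cases hir : i < r.length
      · rw [if_pos (by exact_mod_cast hir), if_pos hir]
      · rw [if_neg (by exact_mod_cast hir), if_neg hir]
    rw [hcol, hsum]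
  · rw [List.getElem?_map, List.getElem?_eq_none (by rw [hacclen]; omega),
      List.getElem?_eq_none (by rw [List.length_map, PySem.List.length_pyRange_one]; simpa using hi)]
    rfl
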